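-- pv_equiv track=rewrite | github.com/pypi-data/pypi-mirror-376 | packages/dailylogfile/dailylogfile-0.3.0.tar.gz/dailylogfile-0.3.0/dailylogfile/__init__.py | _date_format_to_regex
-- ===== SOURCE A (Python) =====
-- def _date_format_to_regex(date_format: str) -> str:
--     """
--     Converts a date format string to a regex pattern for matching dates in
--     filenames.
--
--     args:
--         date_format: the date format string to convert.
--     returns:
--         str: the regex pattern.
--     """
--     replacements = {
--         '%a': r'\w+',
--         '%A': r'\w',
--         '%w': r'\d',
--         '%d': r'\d{2}',
--         '%b': r'\w{3}',
--         '%B': r'\w+',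
--         '%m': r'\d{2}',
--         '%y': r'\d{2}',
--         '%Y': r'\d{4}',
--         '%H': r'\d{2}',
--         '%I': r'\d{2}',
--         '%p': r'AM|PM',
--         '%M': r'\d{2}',
--         '%S': r'\d{2}',
--         '%f': r'\d{6}',
--         '%z': r'\+|-?\d{4}',
--         '%Z': r'\w+',
--         '%j': r'\d{3}',
--         '%U': r'\d{2}',
--         '%W': r'\d{2}',
--         '%G': r'\d{4}',
--         '%u': r'\d',
--         '%V': r'\d{2}',
--     }
--     percent = '%%'
--     unsupported = ['%c', '%x', '%X']
--     for us in unsupported: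
--         if us in date_format:
--             raise ValueError(f'Unsupported date format: {us}')
--     regex = date_format
--     for k, v in replacements.items():
--         regex = regex.replace(k, v)
--     regex = regex.replace(percent, '%')
--     return regex
-- ===== SOURCE B (Python) =====
-- _REPLACEMENTS = {
--     '%a': r'\w+', '%A': r'\w', '%w': r'\d', '%d': r'\d{2}', '%b': r'\w{3}',
--     '%B': r'\w+', '%m': r'\d{2}', '%y': r'\d{2}', '%Y': r'\d{4}', '%H': r'\d{2}',
--     '%I': r'\d{2}', '%p': r'AM|PM', '%M': r'\d{2}', '%S': r'\d{2}', '%f': r'\d{6}',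
--     '%z': r'\+|-?\d{4}', '%Z': r'\w+', '%j': r'\d{3}', '%U': r'\d{2}', '%W': r'\d{2}',
--     '%G': r'\d{4}', '%u': r'\d', '%V': r'\d{2}',
-- }
--
--
-- def _date_format_to_regex(date_format: str) -> str:
--     for us in ('%c', '%x', '%X'):
--         if us in date_format:
--             raise ValueError(f'Unsupported date format: {us}')
--     parts = []
--     i = 0
--     n = len(date_format)
--     while i < n:
--         rep = _REPLACEMENTS.get(date_format[i:i + 2])
--         if rep is None:
--             parts.append(date_format[i])
--             i += 1
--         else:
--             parts.append(rep)
--             i += 2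
--     return ''.join(parts).replace('%%', '%')
-- ===== Notes on version B (the rewrite author's own statement) =====
-- stated objective: alternative
-- what changed: A rewrites the whole string 24 times (one str.replace pass per dict entry plus the final '%%' pass); B makes a single left-to-right scan that looks each 2-char token up in the dict once, then applies the same trailing '%%'->'%' replace.
import Mathlib
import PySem

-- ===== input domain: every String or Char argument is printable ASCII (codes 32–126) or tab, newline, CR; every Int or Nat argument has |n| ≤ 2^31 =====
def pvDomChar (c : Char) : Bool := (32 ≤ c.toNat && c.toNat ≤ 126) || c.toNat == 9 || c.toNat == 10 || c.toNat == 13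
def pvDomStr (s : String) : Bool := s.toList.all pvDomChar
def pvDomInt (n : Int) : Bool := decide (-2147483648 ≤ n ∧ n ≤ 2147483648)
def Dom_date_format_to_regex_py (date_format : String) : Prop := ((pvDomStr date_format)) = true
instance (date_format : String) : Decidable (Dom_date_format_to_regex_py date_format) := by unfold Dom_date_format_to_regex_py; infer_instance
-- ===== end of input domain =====

-- B replaces A's 24 whole-string rewrite passes (one str.replace per dict entry) by a single
-- left-to-right token scan; same trailing '%%'->'%' replace, same ValueError inputs (excluded by Pre_).

-- ===== PORT A =====
-- the dict `replacements`, iterated in insertion order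
def aReplacements : List (String × String) := [("%a", "\\w+"), ("%A", "\\w"), ("%w", "\\d"), ("%d", "\\d{2}"), ("%b", "\\w{3}"), ("%B", "\\w+"), ("%m", "\\d{2}"), ("%y", "\\d{2}"), ("%Y", "\\d{4}"), ("%H", "\\d{2}"), ("%I", "\\d{2}"), ("%p", "AM|PM"), ("%M", "\\d{2}"), ("%S", "\\d{2}"), ("%f", "\\d{6}"), ("%z", "\\+|-?\\d{4}"), ("%Z", "\\w+"), ("%j", "\\d{3}"), ("%U", "\\d{2}"), ("%W", "\\d{2}"), ("%G", "\\d{4}"), ("%u", "\\d"), ("%V", "\\d{2}")]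

-- A's `for us in unsupported: raise ValueError` loop raises exactly on the inputs Pre_ excludes,
-- so it contributes nothing on admitted inputs and is not re-simulated here.
def date_format_to_regex_py (date_format : String) : String :=
  let regex := aReplacements.foldl (fun r kv => PySem.Str.replace r kv.1 kv.2) date_format
  PySem.Str.replace regex "%%" "%"

-- ===== PORT B =====
-- B's dict _REPLACEMENTS as an association list keyed by the 2-char token (lookup = first match)
def bTable : List (List Char × List Char) := [(['%', 'a'], ['\\', 'w', '+']),
   (['%', 'A'], ['\\', 'w']),
   (['%', 'w'], ['\\', 'd']),
   (['%', 'd'], ['\\', 'd', '{', '2', '}']),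
   (['%', 'b'], ['\\', 'w', '{', '3', '}']),
   (['%', 'B'], ['\\', 'w', '+']),
   (['%', 'm'], ['\\', 'd', '{', '2', '}']),
   (['%', 'y'], ['\\', 'd', '{', '2', '}']),
   (['%', 'Y'], ['\\', 'd', '{', '4', '}']),
   (['%', 'H'], ['\\', 'd', '{', '2', '}']),
   (['%', 'I'], ['\\', 'd', '{', '2', '}']),
   (['%', 'p'], ['A', 'M', '|', 'P', 'M']),
   (['%', 'M'], ['\\', 'd', '{', '2', '}']),
   (['%', 'S'], ['\\', 'd', '{', '2', '}']),
   (['%', 'f'], ['\\', 'd', '{', '6', '}']),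
   (['%', 'z'], ['\\', '+', '|', '-', '?', '\\', 'd', '{', '4', '}']),
   (['%', 'Z'], ['\\', 'w', '+']),
   (['%', 'j'], ['\\', 'd', '{', '3', '}']),
   (['%', 'U'], ['\\', 'd', '{', '2', '}']),
   (['%', 'W'], ['\\', 'd', '{', '2', '}']),
   (['%', 'G'], ['\\', 'd', '{', '4', '}']),
   (['%', 'u'], ['\\', 'd']),
   (['%', 'V'], ['\\', 'd', '{', '2', '}'])]

-- _REPLACEMENTS.get(date_format[i:i+2])
def bGet (tok : List Char) : Option (List Char) :=
  (List.find? (fun p => p.1 == tok) bTable).map Prod.snd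

-- B's while loop over the characters: look up the 2-char window, emit the value and skip 2,
-- else emit the character and advance 1 (a final lone character has a 1-char window: no key matches)
def scanB : List Char → List Char
  | [] => []
  | [c] => [c]
  | c1 :: c2 :: rest =>
    match bGet [c1, c2] with
    | some v => v ++ scanB rest
    | none => c1 :: scanB (c2 :: rest)

def date_format_to_regex_py_alt (date_format : String) : String :=
  PySem.Str.replace (String.ofList (scanB date_format.toList)) "%%" "%"

-- ===== PRECONDITION & SPEC =====
-- Pre_ excludes exactly the inputs containing '%c', '%x' or '%X', on which Python A (and Python B)
-- raises ValueError('Unsupported date format: …').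
def Pre_date_format_to_regex_py (date_format : String) : Prop :=
  PySem.Str.isIn "%c" date_format = false ∧ PySem.Str.isIn "%x" date_format = false ∧ PySem.Str.isIn "%X" date_format = false
instance (date_format : String) : Decidable (Pre_date_format_to_regex_py date_format) := by unfold Pre_date_format_to_regex_py; infer_instance

def pvWitness_date_format_to_regex_py : String := "%Y-%m-%d %%q"

def Spec_date_format_to_regex_py (date_format : String) (out : String) : Prop := out = date_format_to_regex_py_alt date_format
instance (date_format : String) (out : String) : Decidable (Spec_date_format_to_regex_py date_format out) := by unfold Spec_date_format_to_regex_py; infer_instance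

-- ===== CLAIM (what is proved, stated in full; the proofs are below) =====
def Claim_equal_date_format_to_regex_py : Prop := ∀ (date_format : String), Dom_date_format_to_regex_py date_format → Pre_date_format_to_regex_py date_format → Spec_date_format_to_regex_py date_format (date_format_to_regex_py date_format)

-- ===== LEMMAS AND PROOFS =====

-- rep2 k v l = Python l.replace('%'+k, v): structural recursion form of str.replace for a 2-char needle
def rep2 (k : Char) (v : List Char) : List Char → List Char
  | [] => []
  | [c] => [c]
  | c1 :: c2 :: t => if c1 = '%' ∧ c2 = k then v ++ rep2 k v t else c1 :: rep2 k v (c2 :: t)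

lemma go_eq (k : Char) (v : List Char) : ∀ (fuel : Nat) (l acc : List Char), l.length ≤ fuel →
    PySem.Chars.replace.go ['%', k] v fuel l acc = acc.reverse ++ rep2 k v l := by
  intro fuel
  induction fuel with
  | zero =>
    intro l acc h
    cases l with
    | nil => rw [PySem.Chars.replace.go.eq_def]; simp [rep2]
    | cons c t => simp at h
  | succ n ih =>
    intro l acc h
    rw [PySem.Chars.replace.go.eq_def]
    cases l with
    | nil => simp [rep2]
    | cons c1 t1 =>
      cases t1 with
      | nil =>
        have hp : (List.isPrefixOf ['%', k] [c1]) = false := by simp [List.isPrefixOf]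
        simp only [hp, Bool.false_eq_true, if_false]
        rw [ih [] (c1 :: acc) (by simp)]
        simp [rep2]
      | cons c2 t =>
        by_cases hm : c1 = '%' ∧ c2 = k
        · have hp : (List.isPrefixOf ['%', k] (c1 :: c2 :: t)) = true := by
            simp [List.isPrefixOf, hm.1, hm.2]
          simp only [hp, if_true, List.length_cons, List.drop_succ_cons, List.drop_zero,
            List.length_nil, Nat.zero_add, Nat.reduceAdd]
          rw [ih t (v.reverse ++ acc) (by simp at h ⊢; omega)]
          simp [rep2, hm.1, hm.2]
        · have hp : (List.isPrefixOf ['%', k] (c1 :: c2 :: t)) = false := by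
            simp [List.isPrefixOf]
            intro h1 h2
            exact absurd ⟨h1.symm, h2.symm⟩ hm
          simp only [hp, Bool.false_eq_true, if_false]
          rw [ih (c2 :: t) (c1 :: acc) (by simp at h ⊢; omega)]
          rw [rep2, if_neg hm]
          simp
lemma replEq (k : Char) (v s : List Char) : PySem.Chars.replace s ['%', k] v = rep2 k v s := by
  rw [PySem.Chars.replace]
  simp only [List.isEmpty_cons, Bool.false_eq_true, if_false]
  rw [go_eq k v s.length s [] le_rfl]
  simp

def pairsC : List (Char × List Char) := [('a', ['\\', 'w', '+']),
   ('A', ['\\', 'w']),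
   ('w', ['\\', 'd']),
   ('d', ['\\', 'd', '{', '2', '}']),
   ('b', ['\\', 'w', '{', '3', '}']),
   ('B', ['\\', 'w', '+']),
   ('m', ['\\', 'd', '{', '2', '}']),
   ('y', ['\\', 'd', '{', '2', '}']),
   ('Y', ['\\', 'd', '{', '4', '}']),
   ('H', ['\\', 'd', '{', '2', '}']),
   ('I', ['\\', 'd', '{', '2', '}']),
   ('p', ['A', 'M', '|', 'P', 'M']),
   ('M', ['\\', 'd', '{', '2', '}']),
   ('S', ['\\', 'd', '{', '2', '}']),
   ('f', ['\\', 'd', '{', '6', '}']),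
   ('z', ['\\', '+', '|', '-', '?', '\\', 'd', '{', '4', '}']),
   ('Z', ['\\', 'w', '+']),
   ('j', ['\\', 'd', '{', '3', '}']),
   ('U', ['\\', 'd', '{', '2', '}']),
   ('W', ['\\', 'd', '{', '2', '}']),
   ('G', ['\\', 'd', '{', '4', '}']),
   ('u', ['\\', 'd']),
   ('V', ['\\', 'd', '{', '2', '}'])]

def ch (ps : List (Char × List Char)) (l : List Char) : List Char :=
  ps.foldl (fun r p => rep2 p.1 p.2 r) l

def goodCh : List (Char × List Char) → Bool
  | [] => true
  | (_, v) :: ps => (!v.isEmpty) && (!(ps.map Prod.fst).contains (v.headD ' ')) && goodCh ps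

lemma rep2_cons_ne (k : Char) (v : List Char) (c : Char) (t : List Char) (h : c ≠ '%') :
    rep2 k v (c :: t) = c :: rep2 k v t := by
  cases t with
  | nil => simp [rep2]
  | cons c2 t2 => rw [rep2, if_neg (by tauto)]

lemma rep2_cons2_ne (k : Char) (v : List Char) (c : Char) (t : List Char) (h : c ≠ k) :
    rep2 k v ('%' :: c :: t) = '%' :: rep2 k v (c :: t) := by
  rw [rep2, if_neg (by tauto)]

lemma rep2_match (k : Char) (v : List Char) (t : List Char) :
    rep2 k v ('%' :: k :: t) = v ++ rep2 k v t := by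
  rw [rep2, if_pos ⟨rfl, rfl⟩]

lemma rep2_append (k : Char) (v : List Char) (w : List Char) (hw : '%' ∉ w) :
    ∀ X, rep2 k v (w ++ X) = w ++ rep2 k v X := by
  induction w with
  | nil => intro X; simp
  | cons a w ih =>
    intro X
    have ha : a ≠ '%' := by intro h; exact hw (h ▸ List.mem_cons_self)
    rw [List.cons_append, rep2_cons_ne k v a _ ha, ih (fun h => hw (List.mem_cons_of_mem _ h)) X,
      List.cons_append]

lemma ch_split (ps qs : List (Char × List Char)) (l : List Char) :
    ch (ps ++ qs) l = ch qs (ch ps l) := by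
  simp [ch, List.foldl_append]

lemma ch_cons (p : Char × List Char) (ps : List (Char × List Char)) (l : List Char) :
    ch (p :: ps) l = ch ps (rep2 p.1 p.2 l) := rfl

lemma ch_append (ps : List (Char × List Char)) (w : List Char) (hw : '%' ∉ w) :
    ∀ X, ch ps (w ++ X) = w ++ ch ps X := by
  induction ps with
  | nil => intro X; simp [ch]
  | cons p ps ih =>
    intro X
    rw [ch_cons, rep2_append p.1 p.2 w hw X, ih (rep2 p.1 p.2 X), ch_cons]

lemma ch_nil (ps : List (Char × List Char)) : ch ps [] = [] := by
  induction ps with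
  | nil => rfl
  | cons p ps ih => rw [ch_cons]; simp only [rep2]; exact ih

lemma ch_cons_ne (ps : List (Char × List Char)) (c : Char) (t : List Char) (hc : c ≠ '%') :
    ch ps (c :: t) = c :: ch ps t := by
  have hw : '%' ∉ [c] := by simpa using (Ne.symm hc)
  have := ch_append ps [c] hw t
  simpa using this

lemma ch_single (ps : List (Char × List Char)) (c : Char) : ch ps [c] = [c] := by
  by_cases hc : c = '%'
  · subst hc
    induction ps with
    | nil => rfl
    | cons p ps ih => rw [ch_cons]; simp only [rep2]; exact ih
  · rw [ch_cons_ne ps c [] hc, ch_nil]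

lemma ch_pre (c : Char) (hcp : c ≠ '%') : ∀ (ps : List (Char × List Char)),
    c ∉ ps.map Prod.fst → ∀ u, ch ps ('%' :: c :: u) = '%' :: c :: ch ps u := by
  intro ps
  induction ps with
  | nil => intro _ u; rfl
  | cons p ps ih =>
    intro hc u
    simp only [List.map_cons, List.mem_cons, not_or] at hc
    rw [ch_cons, rep2_cons2_ne p.1 p.2 c u hc.1, rep2_cons_ne p.1 p.2 c u hcp, ch_cons]
    exact ih (by simpa using hc.2) (rep2 p.1 p.2 u)

lemma ch_percent : ∀ (ps : List (Char × List Char)), goodCh ps = true →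
    ∀ (c : Char) (t : List Char), c ∉ ps.map Prod.fst →
    ch ps ('%' :: c :: t) = '%' :: ch ps (c :: t) := by
  intro ps
  induction ps with
  | nil => intro _ c t _; rfl
  | cons p ps ih =>
    intro hg c t hc
    obtain ⟨k, v⟩ := p
    simp only [goodCh, Bool.and_eq_true, Bool.not_eq_true'] at hg
    obtain ⟨⟨hv, hh⟩, hg'⟩ := hg
    simp only [List.map_cons, List.mem_cons, not_or] at hc
    have hck : c ≠ k := hc.1
    have hc' : c ∉ ps.map Prod.fst := hc.2
    rw [ch_cons, rep2_cons2_ne k v c t hck, ch_cons]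
    cases t with
    | nil =>
      have h1 : rep2 k v [c] = [c] := by simp [rep2]
      rw [h1]
      exact ih hg' c [] hc'
    | cons c2 t2 =>
      by_cases hm : c = '%' ∧ c2 = k
      · obtain ⟨h1, h2⟩ := hm
        subst h1
        rw [h2, rep2_match k v t2]
        cases v with
        | nil => simp at hv
        | cons vh vt =>
          have hvh : vh ∉ ps.map Prod.fst := by
            simp only [List.headD_cons] at hh
            intro hmem
            rw [List.contains_eq_mem] at hh
            simp only [decide_eq_false_iff_not] at hh
            exact hh hmem
          rw [List.cons_append]
          exact ih hg' vh (vt ++ rep2 k (vh :: vt) t2) hvh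
      · rw [rep2, if_neg hm]
        exact ih hg' c (rep2 k v (c2 :: t2)) hc'

lemma key_step (pre post : List (Char × List Char)) (c : Char) (v : List Char) (rest : List Char)
    (hpre : c ∉ pre.map Prod.fst) (hc : c ≠ '%') (hv : '%' ∉ v) :
    ch (pre ++ (c, v) :: post) ('%' :: c :: rest) = v ++ ch (pre ++ (c, v) :: post) rest := by
  rw [ch_split, ch_split, ch_pre c hc pre hpre rest, ch_cons, ch_cons]
  simp only
  rw [rep2_match c v (ch pre rest), ch_append post v hv]

lemma bTable_eq : bTable = pairsC.map (fun p => (['%', p.1], p.2)) := by rfl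

lemma bGet_eq (c1 c2 : Char) :
    bGet [c1, c2] = if c1 = '%' then (pairsC.find? (fun p => p.1 == c2)).map Prod.snd else none := by
  unfold bGet
  rw [bTable_eq, List.find?_map]
  have hpred : ((fun p : List Char × List Char => p.1 == [c1, c2]) ∘
      (fun p : Char × List Char => (['%', p.1], p.2))) =
      (fun p : Char × List Char => ('%' == c1) && (p.1 == c2)) := by
    funext p
    simp [List.cons_beq_cons]
  rw [hpred]
  by_cases h : c1 = '%'
  · subst h
    simp only [beq_self_eq_true, Bool.true_and, if_true, Option.map_map]
    rfl
  · have : ('%' == c1) = false := by simpa using (Ne.symm h)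
    simp [this, h, List.find?_eq_none]

lemma scan_cons_ne (c : Char) (t : List Char) (hc : c ≠ '%') : scanB (c :: t) = c :: scanB t := by
  cases t with
  | nil => rfl
  | cons c2 t2 =>
    have hbg : bGet [c, c2] = none := by rw [bGet_eq, if_neg hc]
    rw [scanB, hbg]

lemma pairsC_keys_ne_percent : '%' ∉ pairsC.map Prod.fst := by decide
lemma pairsC_vals_no_percent : ∀ p ∈ pairsC, '%' ∉ p.2 := by decide
lemma pairsC_good : goodCh pairsC = true := by decide

lemma mainAux : ∀ (n : Nat) (l : List Char), l.length ≤ n → ch pairsC l = scanB l := by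
  intro n
  induction n with
  | zero =>
    intro l h
    have hl : l = [] := List.eq_nil_of_length_eq_zero (Nat.le_zero.mp h)
    subst hl
    rw [ch_nil]; rfl
  | succ n ih =>
    intro l h
    match l with
    | [] => rw [ch_nil]; rfl
    | [c] => rw [ch_single]; rfl
    | c1 :: c2 :: rest =>
      simp only [List.length_cons] at h
      by_cases h1 : c1 = '%'
      · subst h1
        rcases hf : pairsC.find? (fun p => p.1 == c2) with _ | pr
        · have hkeys : c2 ∉ pairsC.map Prod.fst := by
            intro hmem
            rw [List.find?_eq_none] at hf
            simp only [List.mem_map] at hmem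
            obtain ⟨p, hp, hpe⟩ := hmem
            have := hf p hp
            simp [hpe] at this
          have hbg : bGet ['%', c2] = none := by rw [bGet_eq, if_pos rfl, hf]; rfl
          rw [show scanB ('%' :: c2 :: rest) = '%' :: scanB (c2 :: rest) by
            rw [scanB, hbg]]
          by_cases h2 : c2 = '%'
          · subst h2
            rw [ch_percent pairsC pairsC_good '%' rest hkeys]
            rw [ih ('%' :: rest) (by simpa using Nat.le_of_succ_le_succ h)]
          · rw [ch_pre c2 h2 pairsC hkeys rest, scan_cons_ne c2 rest h2]
            rw [ih rest (by omega)]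
        · have hsome := List.find?_eq_some_iff_append.mp hf
          obtain ⟨hpb, pre, post, hdecomp, hprev⟩ := hsome
          have hpr1 : pr.1 = c2 := by simpa using hpb
          have hmem : pr ∈ pairsC := by rw [hdecomp]; simp
          have hc2p : c2 ≠ '%' := by
            intro hcp
            exact pairsC_keys_ne_percent (List.mem_map.mpr ⟨pr, hmem, by rw [hpr1, hcp]⟩)
          have hvp : '%' ∉ pr.2 := pairsC_vals_no_percent pr hmem
          have hpre : c2 ∉ pre.map Prod.fst := by
            intro hm
            simp only [List.mem_map] at hm
            obtain ⟨q, hq, hq1⟩ := hm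
            have := hprev q hq
            simp [hq1] at this
          have hbg : bGet ['%', c2] = some pr.2 := by rw [bGet_eq, if_pos rfl, hf]; rfl
          rw [show scanB ('%' :: c2 :: rest) = pr.2 ++ scanB rest by
            rw [scanB, hbg]]
          have hpr : pr = (c2, pr.2) := by rw [← hpr1]
          rw [hdecomp, hpr, key_step pre post c2 pr.2 rest hpre hc2p hvp, ← hpr, ← hdecomp]
          rw [ih rest (by omega)]
      · have hbg : bGet [c1, c2] = none := by rw [bGet_eq, if_neg h1]
        rw [show scanB (c1 :: c2 :: rest) = c1 :: scanB (c2 :: rest) by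
          rw [scanB, hbg]]
        rw [ch_cons_ne pairsC c1 (c2 :: rest) h1]
        rw [ih (c2 :: rest) (by simpa using Nat.le_of_succ_le_succ h)]

lemma A_fold (s : String) :
    (aReplacements.foldl (fun r kv => PySem.Str.replace r kv.1 kv.2) s).toList = ch pairsC s.toList := by
  simp only [aReplacements, List.foldl_cons, List.foldl_nil, PySem.Str.toList_replace,
    (show ("%a" : String).toList = ['%', 'a'] from rfl),
    (show ("%A" : String).toList = ['%', 'A'] from rfl),
    (show ("%w" : String).toList = ['%', 'w'] from rfl),
    (show ("%d" : String).toList = ['%', 'd'] from rfl),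
    (show ("%b" : String).toList = ['%', 'b'] from rfl),
    (show ("%B" : String).toList = ['%', 'B'] from rfl),
    (show ("%m" : String).toList = ['%', 'm'] from rfl),
    (show ("%y" : String).toList = ['%', 'y'] from rfl),
    (show ("%Y" : String).toList = ['%', 'Y'] from rfl),
    (show ("%H" : String).toList = ['%', 'H'] from rfl),
    (show ("%I" : String).toList = ['%', 'I'] from rfl),
    (show ("%p" : String).toList = ['%', 'p'] from rfl),
    (show ("%M" : String).toList = ['%', 'M'] from rfl),
    (show ("%S" : String).toList = ['%', 'S'] from rfl),
    (show ("%f" : String).toList = ['%', 'f'] from rfl),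
    (show ("%z" : String).toList = ['%', 'z'] from rfl),
    (show ("%Z" : String).toList = ['%', 'Z'] from rfl),
    (show ("%j" : String).toList = ['%', 'j'] from rfl),
    (show ("%U" : String).toList = ['%', 'U'] from rfl),
    (show ("%W" : String).toList = ['%', 'W'] from rfl),
    (show ("%G" : String).toList = ['%', 'G'] from rfl),
    (show ("%u" : String).toList = ['%', 'u'] from rfl),
    (show ("%V" : String).toList = ['%', 'V'] from rfl),
    (show ("\\w+" : String).toList = ['\\', 'w', '+'] from rfl),
    (show ("\\w" : String).toList = ['\\', 'w'] from rfl),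
    (show ("\\d" : String).toList = ['\\', 'd'] from rfl),
    (show ("\\d{2}" : String).toList = ['\\', 'd', '{', '2', '}'] from rfl),
    (show ("\\w{3}" : String).toList = ['\\', 'w', '{', '3', '}'] from rfl),
    (show ("\\d{4}" : String).toList = ['\\', 'd', '{', '4', '}'] from rfl),
    (show ("AM|PM" : String).toList = ['A', 'M', '|', 'P', 'M'] from rfl),
    (show ("\\d{6}" : String).toList = ['\\', 'd', '{', '6', '}'] from rfl),
    (show ("\\+|-?\\d{4}" : String).toList = ['\\', '+', '|', '-', '?', '\\', 'd', '{', '4', '}'] from rfl),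
    (show ("\\d{3}" : String).toList = ['\\', 'd', '{', '3', '}'] from rfl),
    replEq]
  simp only [ch, pairsC, List.foldl_cons, List.foldl_nil]

-- ===== VERDICT (by name: the statement is the Claim_ definition above) =====
theorem date_format_to_regex_py_spec : Claim_equal_date_format_to_regex_py := by
  intro s _ _
  unfold Spec_date_format_to_regex_py date_format_to_regex_py date_format_to_regex_py_alt
  apply String.toList_inj.mp
  simp only [PySem.Str.toList_replace, String.toList_ofList]
  rw [A_fold, mainAux s.toList.length s.toList le_rfl]
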